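-- pv_equiv track=rewrite | github.com/awellisz/BS-Poker | main.py | sixok
-- ===== SOURCE A (Python) =====
-- from collections import Counter
--
-- def contains_all(a, b):
--     """
--     Utility function
--     Check if array A contains all elements of B, including with repeated values.
--     E.g. containsall([11, 4, 6], [4, 4]) -> False
--     E.g. containsall([11, 4, 6], [6, 11]) -> True
--     """
--     counter_a = Counter(a)
--     counter_b = Counter(b)
--     return all(v <= counter_a[k] for k, v in counter_b.items())
--
-- def sixok(hand, c):
--     """
--     Return true if six of a kind of given card
--     """
--     if (len(hand) < 6):
--         return False
--
--     matches = [[c, c, c, c, 2, 2], [c, c, c, 2, 2, 2], [c, c, 2, 2, 2, 2]]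
--     for match in matches:
--         if contains_all(hand, match):
--             return True
--     return False
-- ===== SOURCE B (Python) =====
-- from collections import Counter
--
-- def sixok(hand, c):
--     """
--     Return true if six of a kind of given card
--     """
--     if len(hand) < 6:
--         return False
--     counts = Counter(hand)
--     nc, nw = counts[c], counts[2]
--     if c == 2:
--         return nc >= 6
--     return (nc >= 4 and nw >= 2) or (nc >= 3 and nw >= 3) or (nc >= 2 and nw >= 4)
-- ===== Notes on version B (the rewrite author's own statement) =====
-- stated objective: simpler
-- what changed: Replaces the three-pattern loop plus the generic Counter-containment helper contains_all with one Counter built once, reading the card count and the wild-2 count, and a closed-form boolean over those two counts (with an explicit c == 2 case); measured constant-factor speedup since A builds four Counters per call.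
import Mathlib
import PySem

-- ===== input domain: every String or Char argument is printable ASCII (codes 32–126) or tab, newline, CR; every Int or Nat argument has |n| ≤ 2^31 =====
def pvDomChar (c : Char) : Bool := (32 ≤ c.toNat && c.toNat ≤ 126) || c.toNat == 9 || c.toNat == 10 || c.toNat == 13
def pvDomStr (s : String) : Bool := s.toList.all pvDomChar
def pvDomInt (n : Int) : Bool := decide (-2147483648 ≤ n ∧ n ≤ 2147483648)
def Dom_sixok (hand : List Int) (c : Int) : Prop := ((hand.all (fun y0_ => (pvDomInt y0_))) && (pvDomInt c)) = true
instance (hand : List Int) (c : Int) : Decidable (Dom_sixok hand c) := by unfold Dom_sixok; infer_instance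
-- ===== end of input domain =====

-- B replaces A's three-pattern loop plus generic Counter-containment helper with two Counter reads and a closed-form boolean (simpler decomposition, same cost).


-- ===== PORT A =====
-- contains_all: Counter(a), Counter(b), all(v <= counter_a[k] for k, v in counter_b.items())
def containsAll (a b : List Int) : Bool :=
  (PySem.Dict.counter b).items.all (fun kv => decide (kv.2 ≤ (PySem.Dict.counter a).getD kv.1 0))

def sixok (hand : List Int) (c : Int) : Bool :=
  if hand.length < 6 then false
  else
    ([[c, c, c, c, 2, 2], [c, c, c, 2, 2, 2], [c, c, 2, 2, 2, 2]].any
      (fun m => containsAll hand m))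

-- ===== PORT B =====
def sixok_alt (hand : List Int) (c : Int) : Bool :=
  if hand.length < 6 then false
  else
    let counts := PySem.Dict.counter hand
    let nc : Int := counts.getD c 0
    let nw : Int := counts.getD 2 0
    if c == 2 then decide (nc ≥ 6)
    else (decide (nc ≥ 4) && decide (nw ≥ 2)) || (decide (nc ≥ 3) && decide (nw ≥ 3)) ||
         (decide (nc ≥ 2) && decide (nw ≥ 4))

-- ===== PRECONDITION & SPEC =====
def Spec_sixok (hand : List Int) (c : Int) (out : Bool) : Prop := out = sixok_alt hand c
instance (hand : List Int) (c : Int) (out : Bool) : Decidable (Spec_sixok hand c out) := by unfold Spec_sixok; infer_instance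

-- ===== CLAIM (what is proved, stated in full; the proofs are below) =====
def Claim_equal_sixok : Prop := ∀ (hand : List Int) (c : Int), Dom_sixok hand c → Spec_sixok hand c (sixok hand c)

-- ===== LEMMAS AND PROOFS =====
theorem containsAll_eq (a b : List Int) :
    containsAll a b = b.all (fun x => decide ((b.count x : Int) ≤ (a.count x : Int))) := by
  rw [Bool.eq_iff_iff]
  simp [containsAll, PySem.Dict.items_counter, PySem.Dict.getD_counter,
        List.all_eq_true, PySem.Set.mem_ofList]

theorem sixok_eq (hand : List Int) (c : Int) : sixok hand c = sixok_alt hand c := by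
  unfold sixok sixok_alt
  by_cases h6 : hand.length < 6
  · simp [h6]
  · simp only [if_neg h6]
    by_cases hc : c = 2
    · subst hc
      rw [Bool.eq_iff_iff]
      simp [containsAll_eq, List.count_cons]
    · rw [Bool.eq_iff_iff]
      simp [containsAll_eq, List.count_cons, hc, PySem.Dict.getD_counter,
            Ne.symm hc]
      omega

-- ===== VERDICT (by name: the statement is the Claim_ definition above) =====
theorem sixok_spec : Claim_equal_sixok := by
  intro hand c _
  unfold Spec_sixok
  exact sixok_eq hand c
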